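-- pv_equiv track=rewrite | github.com/Adeu1504/IS-LAB | lab1q6.py | find_affine_key_brute_force
-- ===== SOURCE A (Python) =====
-- import math
--
-- def find_affine_key_brute_force(known_plaintext, known_ciphertext):
--     """
--     Finds the affine cipher key (a, b) by brute-forcing all possibilities
--     and checking against a known plaintext-ciphertext pair.
--     """
--     # The value 'a' must be coprime with 26.
--     possible_a = [a for a in range(26) if math.gcd(a, 26) == 1]
--
--     # Convert known text to numerical values (a=0, b=1, ...)
--     p0 = ord(known_plaintext[0].lower()) - ord('a')
--     p1 = ord(known_plaintext[1].lower()) - ord('a')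
--     c0 = ord(known_ciphertext[0].upper()) - ord('A')
--     c1 = ord(known_ciphertext[1].upper()) - ord('A')
--
--     # Iterate through all possible keys (a, b)
--     for a in possible_a:
--         for b in range(26):
--             # Check if this key encrypts the known plaintext to the known ciphertext
--             if (a * p0 + b) % 26 == c0 and (a * p1 + b) % 26 == c1:
--                 return (a, b)  # Key found
--     return None  # Key not found
-- ===== SOURCE B (Python) =====
-- import math
--
--
-- def find_affine_key_brute_force(known_plaintext, known_ciphertext):
--     p0 = ord(known_plaintext[0].lower()) - ord('a')
--     p1 = ord(known_plaintext[1].lower()) - ord('a')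
--     c0 = ord(known_ciphertext[0].upper()) - ord('A')
--     c1 = ord(known_ciphertext[1].upper()) - ord('A')
--     # For each valid 'a', solve the first congruence directly instead of
--     # scanning all 26 values of b, then verify both congruences.
--     for a in range(26):
--         if math.gcd(a, 26) != 1:
--             continue
--         b = (c0 - a * p0) % 26
--         if (a * p0 + b) % 26 == c0 and (a * p1 + b) % 26 == c1:
--             return (a, b)
--     return None
-- ===== Notes on version B (the rewrite author's own statement) =====
-- stated objective: simpler
-- what changed: The inner brute-force loop over all 26 values of b is replaced by solving the first congruence in closed form (b = (c0 - a*p0) % 26) and verifying both congruences, so only one candidate b per a is examined.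
import Mathlib
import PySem

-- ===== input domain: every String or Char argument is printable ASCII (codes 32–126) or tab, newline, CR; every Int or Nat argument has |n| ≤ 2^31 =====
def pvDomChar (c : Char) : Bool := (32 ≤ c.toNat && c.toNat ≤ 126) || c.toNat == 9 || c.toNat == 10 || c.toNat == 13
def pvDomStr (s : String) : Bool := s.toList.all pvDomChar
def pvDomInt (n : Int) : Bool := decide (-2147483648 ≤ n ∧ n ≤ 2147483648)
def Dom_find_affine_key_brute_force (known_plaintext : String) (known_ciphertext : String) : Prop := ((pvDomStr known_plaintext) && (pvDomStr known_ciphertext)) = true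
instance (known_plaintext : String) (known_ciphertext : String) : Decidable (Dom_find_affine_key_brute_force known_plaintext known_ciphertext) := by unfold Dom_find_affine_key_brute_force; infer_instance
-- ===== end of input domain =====

-- B replaces A's inner 26-way search for b by the closed-form solution of the first
-- congruence and a verification of both congruences (objective: simpler — no inner loop).

-- ===== PORT A =====
-- possible_a = [a for a in range(26) if math.gcd(a, 26) == 1]
def pvCoprimeA : List Int :=
  (PySem.List.pyRange 0 26 1).filter (fun a => Int.gcd a 26 == 1)

-- inner loop: for b in range(26): if (a*p0+b)%26 == c0 and (a*p1+b)%26 == c1: return (a, b)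
def pvInnerA (a p0 p1 c0 c1 : Int) : List Int → Option (Int × Int)
  | [] => none
  | b :: rest =>
    if PySem.Int.mod (a * p0 + b) 26 = c0 ∧ PySem.Int.mod (a * p1 + b) 26 = c1 then
      some (a, b)
    else pvInnerA a p0 p1 c0 c1 rest

-- outer loop: for a in possible_a: …
def pvOuterA (p0 p1 c0 c1 : Int) : List Int → Option (Int × Int)
  | [] => none
  | a :: rest =>
    match pvInnerA a p0 p1 c0 c1 (PySem.List.pyRange 0 26 1) with
    | some r => some r
    | none => pvOuterA p0 p1 c0 c1 rest

def find_affine_key_brute_force (known_plaintext : String) (known_ciphertext : String) : Option (Int × Int) :=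
  match PySem.List.pyGet? known_plaintext.toList 0, PySem.List.pyGet? known_plaintext.toList 1,
        PySem.List.pyGet? known_ciphertext.toList 0, PySem.List.pyGet? known_ciphertext.toList 1 with
  | some x0, some x1, some y0, some y1 =>
    let p0 : Int := ((PySem.Chars.lowerChar x0).toNat : Int) - 97
    let p1 : Int := ((PySem.Chars.lowerChar x1).toNat : Int) - 97
    let c0 : Int := ((PySem.Chars.upperChar y0).toNat : Int) - 65
    let c1 : Int := ((PySem.Chars.upperChar y1).toNat : Int) - 65
    pvOuterA p0 p1 c0 c1 pvCoprimeA
  | _, _, _, _ => none  -- IndexError: excluded by Pre_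

-- ===== PORT B =====
-- for a in range(26): if gcd(a,26) != 1: continue; b = (c0 - a*p0) % 26; verify; return
def pvLoopB (p0 p1 c0 c1 : Int) : List Int → Option (Int × Int)
  | [] => none
  | a :: rest =>
    if Int.gcd a 26 == 1 then
      let b := PySem.Int.mod (c0 - a * p0) 26
      if PySem.Int.mod (a * p0 + b) 26 = c0 ∧ PySem.Int.mod (a * p1 + b) 26 = c1 then
        some (a, b)
      else pvLoopB p0 p1 c0 c1 rest
    else pvLoopB p0 p1 c0 c1 rest

def find_affine_key_brute_force_alt (known_plaintext : String) (known_ciphertext : String) : Option (Int × Int) :=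
  (PySem.List.pyGet? known_plaintext.toList 0).bind fun x0 =>
  (PySem.List.pyGet? known_plaintext.toList 1).bind fun x1 =>
  (PySem.List.pyGet? known_ciphertext.toList 0).bind fun y0 =>
  (PySem.List.pyGet? known_ciphertext.toList 1).bind fun y1 =>
    let p0 : Int := ((PySem.Chars.lowerChar x0).toNat : Int) - 97
    let p1 : Int := ((PySem.Chars.lowerChar x1).toNat : Int) - 97
    let c0 : Int := ((PySem.Chars.upperChar y0).toNat : Int) - 65
    let c1 : Int := ((PySem.Chars.upperChar y1).toNat : Int) - 65
    pvLoopB p0 p1 c0 c1 (PySem.List.pyRange 0 26 1)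
  -- a 'none' get (IndexError) propagates to none; excluded by Pre_

-- ===== PRECONDITION & SPEC =====
-- A indexes both strings at 0 and 1, so it raises IndexError unless both have length ≥ 2.
def Pre_find_affine_key_brute_force (known_plaintext : String) (known_ciphertext : String) : Prop :=
  2 ≤ known_plaintext.toList.length ∧ 2 ≤ known_ciphertext.toList.length
instance (known_plaintext : String) (known_ciphertext : String) : Decidable (Pre_find_affine_key_brute_force known_plaintext known_ciphertext) := by unfold Pre_find_affine_key_brute_force; infer_instance

def pvWitness_find_affine_key_brute_force : String × String := ("ab", "cd")

def Spec_find_affine_key_brute_force (known_plaintext : String) (known_ciphertext : String) (out : Option (Int × Int)) : Prop := out = find_affine_key_brute_force_alt known_plaintext known_ciphertext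
instance (known_plaintext : String) (known_ciphertext : String) (out : Option (Int × Int)) : Decidable (Spec_find_affine_key_brute_force known_plaintext known_ciphertext out) := by unfold Spec_find_affine_key_brute_force; infer_instance

-- ===== CLAIM (what is proved, stated in full; the proofs are below) =====
def Claim_equal_find_affine_key_brute_force : Prop := ∀ (known_plaintext : String) (known_ciphertext : String), Dom_find_affine_key_brute_force known_plaintext known_ciphertext → Pre_find_affine_key_brute_force known_plaintext known_ciphertext → Spec_find_affine_key_brute_force known_plaintext known_ciphertext (find_affine_key_brute_force known_plaintext known_ciphertext)

-- ===== LEMMAS AND PROOFS =====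

-- If no element of l satisfies the key condition, A's inner loop returns none.
theorem pvInnerA_none (a p0 p1 c0 c1 : Int) (l : List Int)
    (h : ∀ x ∈ l, ¬ (PySem.Int.mod (a * p0 + x) 26 = c0 ∧ PySem.Int.mod (a * p1 + x) 26 = c1)) :
    pvInnerA a p0 p1 c0 c1 l = none := by
  induction l with
  | nil => rfl
  | cons x rest ih =>
    simp only [pvInnerA]
    rw [if_neg (h x (by simp))]
    exact ih (fun y hy => h y (by simp [hy]))

-- If b0 is in l, satisfies the condition, and is the only element of l that can, the inner loop returns (a, b0).
theorem pvInnerA_some (a p0 p1 c0 c1 b0 : Int) (l : List Int)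
    (hmem : b0 ∈ l)
    (hcond : PySem.Int.mod (a * p0 + b0) 26 = c0 ∧ PySem.Int.mod (a * p1 + b0) 26 = c1)
    (huniq : ∀ x ∈ l, (PySem.Int.mod (a * p0 + x) 26 = c0 ∧ PySem.Int.mod (a * p1 + x) 26 = c1) → x = b0) :
    pvInnerA a p0 p1 c0 c1 l = some (a, b0) := by
  induction l with
  | nil => cases hmem
  | cons x rest ih =>
    simp only [pvInnerA]
    by_cases hx : PySem.Int.mod (a * p0 + x) 26 = c0 ∧ PySem.Int.mod (a * p1 + x) 26 = c1
    · rw [if_pos hx, huniq x (by simp) hx]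
    · rw [if_neg hx]
      rcases List.mem_cons.mp hmem with h | h
      · exact absurd (h ▸ hcond) hx
      · exact ih h (fun y hy => huniq y (by simp [hy]))

-- A's inner 26-way search equals B's closed-form solve-and-verify.
theorem pvInner_eq_closed (a p0 p1 c0 c1 : Int) :
    pvInnerA a p0 p1 c0 c1 (PySem.List.pyRange 0 26 1) =
      (if PySem.Int.mod (a * p0 + PySem.Int.mod (c0 - a * p0) 26) 26 = c0 ∧
          PySem.Int.mod (a * p1 + PySem.Int.mod (c0 - a * p0) 26) 26 = c1 then
        some (a, PySem.Int.mod (c0 - a * p0) 26)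
      else none) := by
  have h26 : (0:Int) < 26 := by norm_num
  set b0 := PySem.Int.mod (c0 - a * p0) 26 with hb0
  have hb0e : b0 = (c0 - a * p0) % 26 := by rw [hb0, PySem.Int.mod_eq_emod_of_pos h26]
  have huniq : ∀ x ∈ PySem.List.pyRange 0 26 1,
      (PySem.Int.mod (a * p0 + x) 26 = c0 ∧ PySem.Int.mod (a * p1 + x) 26 = c1) → x = b0 := by
    intro x hx hc
    have hxb := (PySem.List.mem_pyRange_one.mp hx)
    have h1 : (a * p0 + x) % 26 = c0 := by
      rw [← PySem.Int.mod_eq_emod_of_pos h26]; exact hc.1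
    omega
  by_cases hc : PySem.Int.mod (a * p0 + b0) 26 = c0 ∧ PySem.Int.mod (a * p1 + b0) 26 = c1
  · rw [if_pos hc]
    refine pvInnerA_some a p0 p1 c0 c1 b0 _ ?_ hc huniq
    refine PySem.List.mem_pyRange_one.mpr ?_
    constructor
    · rw [hb0e]; omega
    · rw [hb0e]; omega
  · rw [if_neg hc]
    refine pvInnerA_none a p0 p1 c0 c1 _ ?_
    intro x hx hcx
    exact hc (huniq x hx hcx ▸ hcx)

-- A's outer loop over the filtered list equals B's single loop with a gcd guard.
theorem pvOuter_eq_loop (p0 p1 c0 c1 : Int) (l : List Int) :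
    pvOuterA p0 p1 c0 c1 (l.filter (fun a => Int.gcd a 26 == 1)) = pvLoopB p0 p1 c0 c1 l := by
  induction l with
  | nil => rfl
  | cons a rest ih =>
    by_cases hg : (Int.gcd a 26 == 1) = true
    · simp only [List.filter_cons, hg, if_true]
      simp only [pvOuterA, pvLoopB, hg, if_true, pvInner_eq_closed]
      by_cases hP : PySem.Int.mod (a * p0 + PySem.Int.mod (c0 - a * p0) 26) 26 = c0 ∧
          PySem.Int.mod (a * p1 + PySem.Int.mod (c0 - a * p0) 26) 26 = c1
      · rw [if_pos hP, if_pos hP]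
      · rw [if_neg hP, if_neg hP]
        exact ih
    · have hg' : (Int.gcd a 26 == 1) = false := by simpa using hg
      simp only [List.filter_cons, hg', Bool.false_eq_true, if_false, pvLoopB]
      exact ih

-- ===== VERDICT (by name: the statement is the Claim_ definition above) =====
theorem find_affine_key_brute_force_spec : Claim_equal_find_affine_key_brute_force := by
  intro kp kc _ hpre
  unfold Spec_find_affine_key_brute_force
  obtain ⟨h1, h2⟩ := hpre
  obtain ⟨x0, x1, xs, hx⟩ : ∃ x0 x1 xs, kp.toList = x0 :: x1 :: xs := by
    match h : kp.toList with
    | [] => simp [h] at h1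
    | [x] => simp [h] at h1
    | x0 :: x1 :: xs => exact ⟨x0, x1, xs, rfl⟩
  obtain ⟨y0, y1, ys, hy⟩ : ∃ y0 y1 ys, kc.toList = y0 :: y1 :: ys := by
    match h : kc.toList with
    | [] => simp [h] at h2
    | [y] => simp [h] at h2
    | y0 :: y1 :: ys => exact ⟨y0, y1, ys, rfl⟩
  unfold find_affine_key_brute_force find_affine_key_brute_force_alt
  rw [hx, hy]
  have g0 : PySem.List.pyGet? (x0 :: x1 :: xs) 0 = some x0 :=
    PySem.List.pyGet?_zero_cons x0 (x1 :: xs)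
  have g1 : PySem.List.pyGet? (x0 :: x1 :: xs) 1 = some x1 := by
    simp [PySem.List.pyGet?, PySem.List.pyIdx?]
  have g2 : PySem.List.pyGet? (y0 :: y1 :: ys) 0 = some y0 :=
    PySem.List.pyGet?_zero_cons y0 (y1 :: ys)
  have g3 : PySem.List.pyGet? (y0 :: y1 :: ys) 1 = some y1 := by
    simp [PySem.List.pyGet?, PySem.List.pyIdx?]
  rw [g0, g1, g2, g3]
  simp only [Option.bind_some]
  exact pvOuter_eq_loop _ _ _ _ _
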